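-- pv_equiv track=rewrite | github.com/lindnjoe/helixscreen1 | scripts/format-xml.py | order_attributes
-- ===== SOURCE A (Python) =====
-- PRIORITY_ATTRS = ["name", "extends", "width", "height"]
--
-- def order_attributes(attrs: dict) -> list[tuple[str, str]]:
--     """Order attributes with priority attrs first, then original order."""
--     result = []
--     remaining = dict(attrs)
--
--     # Add priority attributes first (if present)
--     for attr in PRIORITY_ATTRS:
--         if attr in remaining:
--             result.append((attr, remaining.pop(attr)))
--
--     # Add remaining attributes in original order (dict preserves insertion order in Python 3.7+)
--     for attr, value in remaining.items():
--         result.append((attr, value))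
--
--     return result
-- ===== SOURCE B (Python) =====
-- PRIORITY_ATTRS = ["name", "extends", "width", "height"]
--
-- def order_attributes(attrs: dict) -> list[tuple[str, str]]:
--     """Order attributes with priority attrs first, then original order."""
--     return sorted(
--         attrs.items(),
--         key=lambda kv: PRIORITY_ATTRS.index(kv[0]) if kv[0] in PRIORITY_ATTRS else len(PRIORITY_ATTRS),
--     )
-- ===== Notes on version B (the rewrite author's own statement) =====
-- stated objective: idiomatic
-- what changed: Replaces A's dict-copying two-pass partition (pop priority keys, then append the leftover dict items) with a single stable sort of the items keyed on the priority index (non-priority keys all get rank len(PRIORITY_ATTRS), so stability preserves their original order).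
import Mathlib
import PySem

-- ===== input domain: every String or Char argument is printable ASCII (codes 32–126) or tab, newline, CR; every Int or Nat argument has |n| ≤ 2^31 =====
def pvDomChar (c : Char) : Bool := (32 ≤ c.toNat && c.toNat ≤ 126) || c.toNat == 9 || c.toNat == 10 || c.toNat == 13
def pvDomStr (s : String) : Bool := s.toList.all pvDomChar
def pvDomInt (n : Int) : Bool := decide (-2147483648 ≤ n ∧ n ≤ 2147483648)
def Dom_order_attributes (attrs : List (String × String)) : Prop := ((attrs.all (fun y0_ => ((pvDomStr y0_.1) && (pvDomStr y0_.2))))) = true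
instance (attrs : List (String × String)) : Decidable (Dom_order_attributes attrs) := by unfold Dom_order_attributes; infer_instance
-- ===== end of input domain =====

-- B replaces A's dict-popping two-pass partition by a single stable sort keyed on the
-- priority rank (idiomatic; same observable result on dict inputs).

-- ===== PORT A =====
def PRIORITY_ATTRS : List String := ["name", "extends", "width", "height"]

-- the body of A's first loop: if attr in remaining: result.append((attr, remaining.pop(attr)))
def pvStepA (st : List (String × String) × PySem.Dict String String) (attr : String) :
    List (String × String) × PySem.Dict String String :=
  match st.2.pop? attr with
  | some (v, d) => (st.1 ++ [(attr, v)], d)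
  | none => st

def order_attributes (attrs : List (String × String)) : List (String × String) :=
  -- result = []; remaining = dict(attrs)
  let remaining : PySem.Dict String String := PySem.Dict.ofList attrs
  -- for attr in PRIORITY_ATTRS: if attr in remaining: result.append((attr, remaining.pop(attr)))
  let st := PRIORITY_ATTRS.foldl pvStepA ([], remaining)
  -- for attr, value in remaining.items(): result.append((attr, value))
  st.2.items.foldl (fun res kv => res ++ [kv]) st.1

-- ===== PORT B =====
-- the sort key of Source B: PRIORITY_ATTRS.index(kv[0]) if kv[0] in PRIORITY_ATTRS else len(PRIORITY_ATTRS)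
def pvRank (k : String) : Int :=
  if PRIORITY_ATTRS.contains k then (((PySem.List.index? PRIORITY_ATTRS k).getD 0 : Nat) : Int)
  else (PRIORITY_ATTRS.length : Int)

def order_attributes_alt (attrs : List (String × String)) : List (String × String) :=
  PySem.List.sorted attrs (fun kv => pvRank kv.1)

-- ===== PRECONDITION & SPEC =====
-- Pre_ excludes association lists with a repeated key: such a list never arises from a Python
-- dict argument, and on it A's dict-based collapsing of duplicates is a representation accident.
def Pre_order_attributes (attrs : List (String × String)) : Prop := (attrs.map Prod.fst).Nodup
instance (attrs : List (String × String)) : Decidable (Pre_order_attributes attrs) := by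
  unfold Pre_order_attributes; infer_instance

def pvWitness_order_attributes : (List (String × String)) := [("name", "1"), ("b", "2")]

def Spec_order_attributes (attrs : List (String × String)) (out : List (String × String)) : Prop := out = order_attributes_alt attrs
instance (attrs : List (String × String)) (out : List (String × String)) : Decidable (Spec_order_attributes attrs out) := by unfold Spec_order_attributes; infer_instance

-- ===== CLAIM (what is proved, stated in full; the proofs are below) =====
def Claim_equal_order_attributes : Prop := ∀ (attrs : List (String × String)), Dom_order_attributes attrs → Pre_order_attributes attrs → Spec_order_attributes attrs (order_attributes attrs)

-- ===== LEMMAS AND PROOFS =====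

-- the rank function written out by cases on the key
theorem pvRank_eq (k : String) : pvRank k =
    if k = "name" then 0 else if k = "extends" then 1 else if k = "width" then 2
    else if k = "height" then 3 else 4 := by
  by_cases h1 : k = "name"
  · subst h1; decide
  · by_cases h2 : k = "extends"
    · subst h2; decide
    · by_cases h3 : k = "width"
      · subst h3; decide
      · by_cases h4 : k = "height"
        · subst h4; decide
        · simp [pvRank, PRIORITY_ATTRS, h1, h2, h3, h4]

-- bucket r of a list: the elements whose key has rank r, in order
def pvBk (r : Int) (l : List (String × String)) : List (String × String) :=
  l.filter (fun p => pvRank p.1 == r)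

def pvCat (l : List (String × String)) : List (String × String) :=
  pvBk 0 l ++ (pvBk 1 l ++ (pvBk 2 l ++ (pvBk 3 l ++ pvBk 4 l)))

theorem insertBy_split (key : String × String → Int) (x : String × String)
    (L1 L2 : List (String × String))
    (h1 : ∀ y ∈ L1, ¬ key x < key y) (h2 : ∀ y ∈ L2, key x < key y) :
    PySem.List.insertBy (fun a b => decide (key a < key b)) x (L1 ++ L2) = L1 ++ x :: L2 := by
  induction L1 with
  | nil =>
    cases L2 with
    | nil => simp [PySem.List.insertBy]
    | cons z zs => simp [PySem.List.insertBy, h2 z (by simp)]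
  | cons a L1 ih =>
    simp only [List.cons_append, PySem.List.insertBy]
    rw [if_neg (by simpa using h1 a (by simp))]
    rw [ih (fun y hy => h1 y (by simp [hy]))]

theorem mem_pvBk_rank {r : Int} {l : List (String × String)} {y : String × String}
    (h : y ∈ pvBk r l) : pvRank y.1 = r := by
  have := (List.mem_filter.mp h).2
  simpa using this

theorem pvRank_cases (k : String) :
    pvRank k = 0 ∨ pvRank k = 1 ∨ pvRank k = 2 ∨ pvRank k = 3 ∨ pvRank k = 4 := by
  rw [pvRank_eq]; split_ifs <;> simp

theorem pvBk_append_single (r : Int) (l : List (String × String)) (x : String × String) :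
    pvBk r (l ++ [x]) = pvBk r l ++ if pvRank x.1 = r then [x] else [] := by
  simp only [pvBk, List.filter_append]
  congr 1
  by_cases h : pvRank x.1 = r <;> simp [h]

theorem insertBy_cat (x : String × String) (ys : List (String × String)) :
    PySem.List.insertBy (fun a b => decide (pvRank a.1 < pvRank b.1)) x (pvCat ys)
      = pvCat (ys ++ [x]) := by
  have hmem : ∀ (r : Int) (y : String × String), y ∈ pvBk r ys → pvRank y.1 = r := fun r y hy => mem_pvBk_rank hy
  rcases pvRank_cases x.1 with h | h | h | h | h
  · have e : pvCat ys = pvBk 0 ys ++ (pvBk 1 ys ++ (pvBk 2 ys ++ (pvBk 3 ys ++ pvBk 4 ys))) := rfl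
    rw [e, insertBy_split (fun a => pvRank a.1) x _ _
      (by intro y hy
          have := mem_pvBk_rank hy
          simp [h, this])
      (by intro y hy
          simp only [List.mem_append] at hy
          rcases hy with hy | hy | hy | hy <;> (have := hmem _ _ hy; simp [h, this]))]
    simp [pvCat, pvBk_append_single, h]
  · have e : pvCat ys = pvBk 0 ys ++ (pvBk 1 ys ++ (pvBk 2 ys ++ (pvBk 3 ys ++ pvBk 4 ys))) := rfl
    rw [e, ← List.append_assoc, insertBy_split (fun a => pvRank a.1) x _ _
      (by intro y hy
          simp only [List.mem_append] at hy
          rcases hy with hy | hy <;> simp [h, hmem _ _ hy])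
      (by intro y hy
          simp only [List.mem_append] at hy
          rcases hy with hy | hy | hy <;> (have := hmem _ _ hy; simp [h, this]))]
    simp [pvCat, pvBk_append_single, h]
  · have e : pvCat ys = (pvBk 0 ys ++ pvBk 1 ys ++ pvBk 2 ys) ++ (pvBk 3 ys ++ pvBk 4 ys) := by
      simp [pvCat]
    rw [e, insertBy_split (fun a => pvRank a.1) x _ _
      (by intro y hy
          simp only [List.mem_append] at hy
          rcases hy with (hy | hy) | hy <;> (have := hmem _ _ hy; simp [h, this]))
      (by intro y hy
          simp only [List.mem_append] at hy
          rcases hy with hy | hy <;> (have := hmem _ _ hy; simp [h, this]))]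
    simp [pvCat, pvBk_append_single, h]
  · have e : pvCat ys = (pvBk 0 ys ++ pvBk 1 ys ++ pvBk 2 ys ++ pvBk 3 ys) ++ pvBk 4 ys := by
      simp [pvCat]
    rw [e, insertBy_split (fun a => pvRank a.1) x _ _
      (by intro y hy
          simp only [List.mem_append] at hy
          rcases hy with ((hy | hy) | hy) | hy <;> (have := hmem _ _ hy; simp [h, this]))
      (by intro y hy
          have := hmem _ _ hy; simp [h, this])]
    simp [pvCat, pvBk_append_single, h]
  · have e : pvCat ys = (pvBk 0 ys ++ pvBk 1 ys ++ pvBk 2 ys ++ pvBk 3 ys ++ pvBk 4 ys) ++ [] := by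
      simp [pvCat]
    rw [e, insertBy_split (fun a => pvRank a.1) x _ _
      (by intro y hy
          simp only [List.mem_append] at hy
          rcases hy with (((hy | hy) | hy) | hy) | hy <;> (have := hmem _ _ hy; simp [h, this]))
      (by simp)]
    simp [pvCat, pvBk_append_single, h]

theorem foldl_ins_cat (xs : List (String × String)) (ys : List (String × String)) :
    xs.foldl (fun acc x => PySem.List.insertBy
        (fun a b => decide (pvRank a.1 < pvRank b.1)) x acc) (pvCat ys)
      = pvCat (ys ++ xs) := by
  induction xs generalizing ys with
  | nil => simp
  | cons x xs ih =>
    simp only [List.foldl_cons]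
    rw [insertBy_cat x ys, ih (ys ++ [x]), List.append_assoc]
    rfl

theorem alt_eq_cat (attrs : List (String × String)) :
    order_attributes_alt attrs = pvCat attrs := by
  have h := foldl_ins_cat attrs []
  simpa [order_attributes_alt, PySem.List.sorted_eq_foldl_insertBy, pvCat, pvBk] using h

-- under unique keys the first match is the only match
theorem filter_key_of_find?_some {l : List (String × String)} {k : String} {p : String × String}
    (hnd : (l.map Prod.fst).Nodup) (h : l.find? (fun q => q.1 == k) = some p) :
    l.filter (fun q => q.1 == k) = [p] := by
  induction l with
  | nil => simp at h
  | cons a tl ih =>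
    simp only [List.map_cons, List.nodup_cons] at hnd
    by_cases ha : a.1 = k
    · have hfind : (a :: tl).find? (fun q => q.1 == k) = some a := by
        simp [ha]
      rw [hfind] at h
      obtain rfl := Option.some.inj h
      have htl : tl.filter (fun q => q.1 == k) = [] := by
        rw [List.filter_eq_nil_iff]
        intro q hq hqk
        have hq1 : q.1 = k := by simpa using hqk
        have hmem : q.1 ∈ tl.map Prod.fst := List.mem_map_of_mem (f := Prod.fst) hq
        rw [hq1, ← ha] at hmem
        exact hnd.1 hmem
      simp [ha, htl]
    · have h' : tl.find? (fun q => q.1 == k) = some p := by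
        simpa [List.find?_cons, ha] using h
      simp [ha, ih hnd.2 h']

theorem stepA (l : List (String × String)) (hnd : (l.map Prod.fst).Nodup)
    (res : List (String × String)) (k : String) :
    pvStepA (res, PySem.Dict.mk l) k
    = (res ++ l.filter (fun p => p.1 == k),
       PySem.Dict.mk (l.filter (fun p => !(p.1 == k)))) := by
  simp only [pvStepA]
  rcases h : l.find? (fun q => q.1 == k) with _ | p
  · have hnone : ∀ x ∈ l, ¬((fun q => q.1 == k) x = true) := List.find?_eq_none.mp h
    have hfe : l.filter (fun p => p.1 == k) = [] := by
      rw [List.filter_eq_nil_iff]; exact hnone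
    have hfs : l.filter (fun p => !(p.1 == k)) = l := by
      rw [List.filter_eq_self]
      intro a ha; simpa using hnone a ha
    simp [PySem.Dict.pop?, PySem.Dict.get?, h, hfe, hfs]
  · have hp : p.1 = k := by simpa using List.find?_some h
    have hfil := filter_key_of_find?_some hnd h
    have hpair : (k, p.2) = p := by rw [← hp]
    simp [PySem.Dict.pop?, PySem.Dict.get?, PySem.Dict.erase, h, hfil, hpair]

theorem items_ofList_of_nodup (attrs : List (String × String))
    (hnd : (attrs.map Prod.fst).Nodup) :
    (PySem.Dict.ofList attrs).items = attrs := by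
  have h := PySem.Dict.items_foldl_insert_fresh attrs Prod.fst Prod.snd PySem.Dict.empty
    (fun a _ => rfl) hnd
  simpa [PySem.Dict.ofList, PySem.Dict.update] using h

theorem filter_pos_ne (l : List (String × String)) (k k' : String) (h : ¬ k' = k) :
    (l.filter (fun p => !(p.1 == k))).filter (fun p => p.1 == k')
      = l.filter (fun p => p.1 == k') := by
  rw [List.filter_filter]
  exact List.filter_congr (fun x _ => by by_cases hx : x.1 = k' <;> simp [hx, h])

theorem nodup_filter_keys (l : List (String × String)) (hnd : (l.map Prod.fst).Nodup)
    (p : String × String → Bool) : ((l.filter p).map Prod.fst).Nodup :=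
  hnd.sublist ((l.filter_sublist).map Prod.fst)

theorem bk_pos0 (l : List (String × String)) :
    l.filter (fun p => p.1 == "name") = pvBk 0 l :=
  List.filter_congr fun x _ => by
    simp only [pvRank_eq]; split_ifs with h1 h2 h3 h4 <;> simp [*]

theorem bk_pos1 (l : List (String × String)) :
    l.filter (fun p => p.1 == "extends") = pvBk 1 l :=
  List.filter_congr fun x _ => by
    simp only [pvRank_eq]; split_ifs with h1 h2 h3 h4 <;> simp [*]

theorem bk_pos2 (l : List (String × String)) :
    l.filter (fun p => p.1 == "width") = pvBk 2 l :=
  List.filter_congr fun x _ => by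
    simp only [pvRank_eq]; split_ifs with h1 h2 h3 h4 <;> simp [*]

theorem bk_pos3 (l : List (String × String)) :
    l.filter (fun p => p.1 == "height") = pvBk 3 l :=
  List.filter_congr fun x _ => by
    simp only [pvRank_eq]; split_ifs with h1 h2 h3 h4 <;> simp [*]

theorem bk_rest (l : List (String × String)) :
    (((l.filter (fun p => !(p.1 == "name"))).filter (fun p => !(p.1 == "extends"))).filter
        (fun p => !(p.1 == "width"))).filter (fun p => !(p.1 == "height")) = pvBk 4 l := by
  rw [List.filter_filter, List.filter_filter, List.filter_filter]
  exact List.filter_congr fun x _ => by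
    simp only [pvRank_eq]; split_ifs with h1 h2 h3 h4 <;> simp [*]

theorem A_eq_cat (attrs : List (String × String)) (hnd : (attrs.map Prod.fst).Nodup) :
    order_attributes attrs = pvCat attrs := by
  have hof : PySem.Dict.ofList attrs = PySem.Dict.mk attrs :=
    PySem.Dict.ext (items_ofList_of_nodup attrs hnd)
  have h1 := nodup_filter_keys attrs hnd (fun p => !(p.1 == "name"))
  have h2 := nodup_filter_keys _ h1 (fun p => !(p.1 == "extends"))
  have h3 := nodup_filter_keys _ h2 (fun p => !(p.1 == "width"))
  show (List.foldl pvStepA ([], PySem.Dict.ofList attrs)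
        ["name", "extends", "width", "height"]).2.items.foldl (fun res kv => res ++ [kv])
      (List.foldl pvStepA ([], PySem.Dict.ofList attrs) ["name", "extends", "width", "height"]).1
    = pvCat attrs
  rw [hof]
  simp only [List.foldl_cons, List.foldl_nil]
  simp only [stepA attrs hnd]
  simp only [stepA _ h1]
  simp only [stepA _ h2]
  simp only [stepA _ h3]
  rw [PySem.List.foldl_append_singleton]
  rw [filter_pos_ne _ _ _ (by decide),
      filter_pos_ne _ _ _ (by decide), filter_pos_ne _ _ _ (by decide),
      filter_pos_ne _ _ _ (by decide), filter_pos_ne _ _ _ (by decide),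
      filter_pos_ne _ _ _ (by decide)]
  rw [bk_pos0, bk_pos1, bk_pos2, bk_pos3, bk_rest]
  simp [pvCat, List.append_assoc]

-- ===== VERDICT (by name: the statement is the Claim_ definition above) =====
theorem order_attributes_spec : Claim_equal_order_attributes := by
  intro attrs _ hpre
  unfold Spec_order_attributes
  rw [A_eq_cat attrs hpre, alt_eq_cat]
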